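-- pv_equiv track=rewrite | github.com/andres-fm/ProblemSolving | diff_powers.py | ie_criteria
-- ===== SOURCE A (Python) =====
-- from itertools import combinations
--
-- def gcd(a, b) :
-- 	dividend = max(a,b)
-- 	divisor = min(a,b)
-- 	r = -1
-- 	while r != 0 :
-- 		r = divmod(dividend, divisor)[1]
-- 		dividend = divisor
-- 		divisor = r
-- 	return dividend
--
-- def lcm(a, b) :
-- 	return (a*b) // gcd(a,b)
--
-- def lcm_it(iterable) :
-- 	current = iterable[0]
-- 	for i in range(1, len(iterable)) :
-- 		current = lcm(current, iterable[i])
-- 	return current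
--
-- def ie_criteria(exp, m) :
-- 	suma = 0
-- 	for i in range(1, exp + 1) :
-- 		for comb in combinations(range(1, exp + 1), i) :
-- 			leastcm = lcm_it(comb)
-- 			a = leastcm // min(comb)
-- 			answer = m // a
-- 			suma += int((-1)**(i+1)) * answer
-- 	return suma
-- ===== SOURCE B (Python) =====
-- def ie_criteria(exp, m):
--     def gcd2(a, b):
--         return a if b == 0 else gcd2(b, a % b)
--
--     def dfs(k, run_lcm, cur_min, count):
--         if k > exp:
--             if count == 0:
--                 return 0
--             return (-1) ** (count + 1) * (m // (run_lcm // cur_min))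
--         excl = dfs(k + 1, run_lcm, cur_min, count)
--         if count == 0:
--             incl = dfs(k + 1, k, k, 1)
--         else:
--             incl = dfs(k + 1, run_lcm * k // gcd2(run_lcm, k), cur_min, count + 1)
--         return excl + incl
--
--     return dfs(1, 0, 0, 0)
-- ===== Notes on version B (the rewrite author's own statement) =====
-- stated objective: alternative
-- what changed: Replaces the subset-size loop over itertools.combinations (which recomputes each subset's lcm from scratch via lcm_it) by a single include/exclude DFS over 1..exp that threads the running lcm, the first included element (the subset's minimum) and the include count, adding each subset's signed term at the leaf.
import Mathlib
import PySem

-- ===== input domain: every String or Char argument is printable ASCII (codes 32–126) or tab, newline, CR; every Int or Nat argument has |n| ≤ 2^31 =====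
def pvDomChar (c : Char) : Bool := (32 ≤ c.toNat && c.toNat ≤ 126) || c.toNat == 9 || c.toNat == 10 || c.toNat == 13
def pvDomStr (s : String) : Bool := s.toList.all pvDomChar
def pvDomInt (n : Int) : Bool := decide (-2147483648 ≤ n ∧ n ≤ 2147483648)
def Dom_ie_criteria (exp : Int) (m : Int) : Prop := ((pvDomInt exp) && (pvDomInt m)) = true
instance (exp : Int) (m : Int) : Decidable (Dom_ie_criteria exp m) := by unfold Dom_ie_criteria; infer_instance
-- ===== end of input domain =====

-- B replaces the size-loop + itertools.combinations enumeration (which recomputes each subset's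
-- lcm from scratch via lcm_it) by an include/exclude DFS over 1..exp threading the running lcm,
-- the first included element (= the subset's min) and the include count.

-- ===== PORT A =====

-- Python's gcd: dividend=max, divisor=min, then the divmod loop. The 'divisor ≤ 0' guard only
-- makes the recursion total; every call A makes has divisor ≥ 1, so it is never taken.
def pyGcdLoop (fuel : Nat) (dividend divisor : Int) : Int :=
  match fuel with
  | 0 => dividend
  | fuel + 1 =>
    if 0 < divisor then
      let r := PySem.Int.mod dividend divisor
      if r = 0 then divisor else pyGcdLoop fuel divisor r
    else dividend

def pyGcd (a b : Int) : Int := pyGcdLoop ((min a b).natAbs + 1) (max a b) (min a b)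

def pyLcm (a b : Int) : Int := PySem.Int.floordiv (a * b) (pyGcd a b)

-- lcm_it: current = iterable[0]; for i in range(1, len): current = lcm(current, iterable[i]).
-- A only calls it on nonempty tuples, so iterable[0] never raises (default 0 is unreachable).
def lcm_it (l : List Int) : Int :=
  List.foldl (fun cur i => pyLcm cur (PySem.List.pyGetD l i 0))
    (PySem.List.pyGetD l 0 0) (PySem.List.pyRange 1 (l.length : Int))

-- itertools.combinations(l, j) in lexicographic order
def combosA : Nat → List Int → List (List Int)
  | 0, _ => [[]]
  | _ + 1, [] => []
  | j + 1, x :: xs => (combosA j xs).map (fun c => x :: c) ++ combosA (j + 1) xs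

def ie_criteria (exp : Int) (m : Int) : Int :=
  List.foldl (fun suma i =>
      List.foldl (fun s comb =>
          let leastcm := lcm_it comb
          let a := PySem.Int.floordiv leastcm ((PySem.List.min? comb id).getD 0)
          let answer := PySem.Int.floordiv m a
          s + (-1 : Int) ^ (i + 1).toNat * answer)
        suma (combosA i.toNat (PySem.List.pyRange 1 (exp + 1))))
    0 (PySem.List.pyRange 1 (exp + 1))

-- ===== PORT B =====

-- gcd2(a, b) = a if b == 0 else gcd2(b, a % b); the fuel argument only makes the
-- recursion structural (|b| strictly decreases, so |b|+1 steps always suffice)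
def bGcd (fuel : Nat) (a b : Int) : Int :=
  match fuel with
  | 0 => a
  | fuel + 1 => if b = 0 then a else bGcd fuel b (PySem.Int.mod a b)

-- lcm2(a, b) = a * b // gcd2(a, b)
def bLcm (a b : Int) : Int := PySem.Int.floordiv (a * b) (bGcd (b.natAbs + 1) a b)

def bDfs (fuel : Nat) (exp m k run_lcm cur_min count : Int) : Int :=
  if k > exp then
    if count = 0 then 0
    else (-1 : Int) ^ (count + 1).toNat *
      PySem.Int.floordiv m (PySem.Int.floordiv run_lcm cur_min)
  else
    match fuel with
    | 0 => 0
    | fuel + 1 =>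
      let excl := bDfs fuel exp m (k + 1) run_lcm cur_min count
      let incl :=
        if count = 0 then bDfs fuel exp m (k + 1) k k 1
        else bDfs fuel exp m (k + 1) (bLcm run_lcm k) cur_min (count + 1)
      excl + incl

def ie_criteria_alt (exp : Int) (m : Int) : Int := bDfs exp.toNat exp m 1 0 0 0

-- ===== PRECONDITION & SPEC =====
def Spec_ie_criteria (exp : Int) (m : Int) (out : Int) : Prop := out = ie_criteria_alt exp m
instance (exp : Int) (m : Int) (out : Int) : Decidable (Spec_ie_criteria exp m out) := by unfold Spec_ie_criteria; infer_instance

-- ===== CLAIM (what is proved, stated in full; the proofs are below) =====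
def Claim_equal_ie_criteria : Prop := ∀ (exp : Int) (m : Int), Dom_ie_criteria exp m → Spec_ie_criteria exp m (ie_criteria exp m)

-- ===== LEMMAS AND PROOFS =====

-- All subsets (as increasing sublists) of l, the order B's DFS visits them in
def mySub : List Int → List (List Int)
  | [] => [[]]
  | x :: xs => mySub xs ++ (mySub xs).map (fun S => x :: S)

-- B's DFS state transition for including one element, and its leaf value
def extF : Int × Int × Int → Int → Int × Int × Int
  | (L, mn, c), x => if c = 0 then (x, x, 1) else (bLcm L x, mn, c + 1)

def leafF (m : Int) : Int × Int × Int → Int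
  | (L, mn, c) => if c = 0 then 0
    else (-1 : Int) ^ (c + 1).toNat *
      PySem.Int.floordiv m (PySem.Int.floordiv L mn)

-- A's per-subset summand, sign taken from the subset's length
def fA (m : Int) : List Int → Int
  | [] => 0
  | x :: rest =>
      (-1 : Int) ^ ((x :: rest).length + 1) *
        PySem.Int.floordiv m (PySem.Int.floordiv (lcm_it (x :: rest))
          ((PySem.List.min? (x :: rest) id).getD 0))

theorem bGcd_irrel : ∀ (n n' : Nat) (a b : Int), b.natAbs < n → b.natAbs < n' →
    bGcd n a b = bGcd n' a b := by
  intro n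
  induction n with
  | zero => intro n' a b hn; omega
  | succ n ih =>
    intro n' a b hn hn'
    cases n' with
    | zero => omega
    | succ n' =>
      rw [bGcd, bGcd]
      by_cases hb : b = 0
      · rw [if_pos hb, if_pos hb]
      · rw [if_neg hb, if_neg hb]
        rcases lt_or_gt_of_ne hb with h | h
        · have := PySem.Int.mod_neg_bounds a h
          exact ih n' b (PySem.Int.mod a b) (by omega) (by omega)
        · have h1 := PySem.Int.mod_nonneg a h
          have h2 := PySem.Int.mod_lt a h
          exact ih n' b (PySem.Int.mod a b) (by omega) (by omega)

theorem bGcd_bounds : ∀ (n : Nat) (s d : Int), s.natAbs < n → 0 < s →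
    0 < bGcd n d s ∧ bGcd n d s ≤ s := by
  intro n
  induction n with
  | zero => intro s d hn hs; omega
  | succ n ih =>
    intro s d hn hs
    rw [bGcd, if_neg (by omega : ¬ s = 0)]
    by_cases hr : PySem.Int.mod d s = 0
    · rw [hr]
      cases n with
      | zero => omega
      | succ n => rw [bGcd, if_pos rfl]; omega
    · have h1 := PySem.Int.mod_nonneg d hs
      have h2 := PySem.Int.mod_lt d hs
      have := ih (PySem.Int.mod d s) s (by omega) (by omega)
      omega

theorem gcdLoop_eq_bGcd : ∀ (n : Nat) (s d : Int), s.natAbs < n → 0 < s →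
    pyGcdLoop n d s = bGcd (s.natAbs + 1) d s := by
  intro n
  induction n with
  | zero => intro s d hn hs; omega
  | succ n ih =>
    intro s d hn hs
    rw [pyGcdLoop, bGcd, if_pos hs, if_neg (by omega : ¬ s = 0)]
    have h1 := PySem.Int.mod_nonneg d hs
    have h2 := PySem.Int.mod_lt d hs
    by_cases hr : PySem.Int.mod d s = 0
    · rw [if_pos hr, hr]
      obtain ⟨t, ht⟩ : ∃ t, s.natAbs = t + 1 := ⟨s.natAbs - 1, by omega⟩
      rw [ht, bGcd, if_pos rfl]
    · rw [if_neg hr]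
      rw [ih (PySem.Int.mod d s) s (by omega) (by omega)]
      exact bGcd_irrel ((PySem.Int.mod d s).natAbs + 1) s.natAbs s (PySem.Int.mod d s)
        (by omega) (by omega)

theorem bGcd_swap (a b : Int) (ha : 1 ≤ a) (hb : 1 ≤ b) :
    bGcd ((min a b).natAbs + 1) (max a b) (min a b) = bGcd (b.natAbs + 1) a b := by
  rcases lt_trichotomy a b with h | h | h
  · rw [max_eq_right h.le, min_eq_left h.le]
    conv_rhs => rw [bGcd]
    rw [if_neg (by omega : ¬ b = 0)]
    rw [PySem.Int.mod_eq_emod_of_pos (by omega), Int.emod_eq_of_lt (by omega) h]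
    exact bGcd_irrel (a.natAbs + 1) b.natAbs b a (by omega) (by omega)
  · subst h
    rw [max_self, min_self]
  · rw [max_eq_left h.le, min_eq_right h.le]

theorem pyLcm_eq_bLcm (a b : Int) (ha : 1 ≤ a) (hb : 1 ≤ b) :
    pyLcm a b = bLcm a b ∧ 1 ≤ bLcm a b := by
  have hg : pyGcd a b = bGcd (b.natAbs + 1) a b := by
    rw [pyGcd, gcdLoop_eq_bGcd ((min a b).natAbs + 1) (min a b) (max a b) (by omega) (by omega)]
    exact bGcd_swap a b ha hb
  have hb1 := bGcd_bounds (b.natAbs + 1) b a (by omega) (by omega)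
  constructor
  · rw [pyLcm, bLcm, hg]
  · rw [bLcm, PySem.Int.le_floordiv_iff_mul_le hb1.1, one_mul]
    nlinarith [hb1.1, hb1.2]

theorem foldl_pyLcm_eq_bLcm : ∀ (rest : List Int) (L : Int), 1 ≤ L →
    (∀ y ∈ rest, 1 ≤ y) →
    rest.foldl pyLcm L = rest.foldl bLcm L := by
  intro rest
  induction rest with
  | nil => intro L _ _; rfl
  | cons y ys ih =>
    intro L hL hmem
    have hy : 1 ≤ y := hmem y (by simp)
    have h := pyLcm_eq_bLcm L y hL hy
    simp only [List.foldl_cons, h.1]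
    exact ih (bLcm L y) h.2 (fun z hz => hmem z (by simp [hz]))

theorem combosA_length : ∀ (j : Nat) (l : List Int) (c : List Int),
    c ∈ combosA j l → c.length = j := by
  intro j l
  induction l generalizing j with
  | nil =>
    intro c hc
    cases j with
    | zero => simp [combosA] at hc; simp [hc]
    | succ j => simp [combosA] at hc
  | cons x xs ih =>
    intro c hc
    cases j with
    | zero => simp [combosA] at hc; simp [hc]
    | succ j =>
      simp only [combosA, List.mem_append, List.mem_map] at hc
      rcases hc with ⟨c', hc', rfl⟩ | hc
      · simp [ih j c' hc']
      · exact ih (j+1) c hc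

theorem combosA_nil_of_big : ∀ (l : List Int) (j : Nat), l.length < j → combosA j l = [] := by
  intro l
  induction l with
  | nil => intro j hj; cases j with
    | zero => simp at hj
    | succ j => rfl
  | cons x xs ih =>
    intro j hj
    cases j with
    | zero => simp at hj
    | succ j =>
      simp only [List.length_cons] at hj
      simp [combosA, ih j (by omega), ih (j+1) (by omega)]

theorem sumC : ∀ (l : List Int) (f : List Int → Int),
    ((List.range (l.length + 1)).map (fun j => ((combosA j l).map f).sum)).sum
      = ((mySub l).map f).sum := by
  intro l
  induction l with
  | nil => intro f; simp [combosA, mySub]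
  | cons x xs ih =>
    intro f
    have hbig : combosA (xs.length + 1) xs = [] := combosA_nil_of_big xs _ (by omega)
    have e1 : ∀ j : Nat, ((combosA (j+1) (x :: xs)).map f).sum
        = ((combosA j xs).map (fun S => f (x :: S))).sum + ((combosA (j+1) xs).map f).sum := by
      intro j
      simp [combosA, List.map_map, Function.comp_def]
    have hA := ih (fun S => f (x :: S))
    have hB := ih f
    calc ((List.range ((x :: xs).length + 1)).map (fun j => ((combosA j (x :: xs)).map f).sum)).sum
        = f [] + ((List.range (xs.length + 1)).map
            (fun j => ((combosA j xs).map (fun S => f (x :: S))).sum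
              + ((combosA (j+1) xs).map f).sum)).sum := by
          rw [List.length_cons, List.range_succ_eq_map]
          simp only [List.map_cons, List.sum_cons, List.map_map]
          congr 1
          · simp [combosA]
          · congr 1
            apply List.map_congr_left
            intro j _
            simp only [Function.comp_apply, Nat.succ_eq_add_one]
            exact e1 j
      _ = f [] + (((List.range (xs.length + 1)).map
              (fun j => ((combosA j xs).map (fun S => f (x :: S))).sum)).sum
            + ((List.range (xs.length + 1)).map
              (fun j => ((combosA (j+1) xs).map f).sum)).sum) := by
          rw [PySem.List.sum_map_add_int]
      _ = f [] + (((mySub xs).map (fun S => f (x :: S))).sum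
            + (((mySub xs).map f).sum - f [])) := by
          have hext : ((List.range (xs.length + 1 + 1)).map
              (fun j => ((combosA j xs).map f).sum)).sum
              = ((List.range (xs.length + 1)).map
                  (fun j => ((combosA j xs).map f).sum)).sum := by
            rw [List.range_succ]
            simp [hbig]
          have hshift : ((List.range (xs.length + 1)).map
              (fun j => ((combosA (j+1) xs).map f).sum)).sum
              = ((List.range (xs.length + 1 + 1)).map
                  (fun j => ((combosA j xs).map f).sum)).sum - f [] := by
            conv_rhs => rw [List.range_succ_eq_map]
            simp only [List.map_cons, List.sum_cons, List.map_map, Function.comp_def,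
              Nat.succ_eq_add_one]
            have h0 : ((combosA 0 xs).map f).sum = f [] := by simp [combosA]
            rw [h0]; ring
          rw [hA, hshift, hext, hB]
      _ = ((mySub (x :: xs)).map f).sum := by
          simp only [mySub, List.map_append, List.sum_append, List.map_map, Function.comp_def]
          ring

theorem mySub_sublist : ∀ (l : List Int) (S : List Int), S ∈ mySub l → S.Sublist l := by
  intro l
  induction l with
  | nil => intro S hS; simp [mySub] at hS; simp [hS]
  | cons x xs ih =>
    intro S hS
    simp only [mySub, List.mem_append, List.mem_map] at hS
    rcases hS with hS | ⟨S', hS', rfl⟩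
    · exact (ih S hS).trans (List.sublist_cons_self x xs)
    · exact (ih S' hS').cons₂ x

theorem min?_cons_eq : ∀ (rest : List Int) (x : Int), (∀ y ∈ rest, x ≤ y) →
    PySem.List.min? (x :: rest) id = some x := by
  intro rest
  induction rest with
  | nil => intro x _; rfl
  | cons y ys ih =>
    intro x h
    have hy : x ≤ y := h y (by simp)
    have hx : PySem.List.min? (x :: y :: ys) id = PySem.List.min? (x :: ys) id := by
      simp only [PySem.List.min?, List.foldl_cons]
      congr 1
      show (if id y < id x then some y else some x) = some x
      rw [if_neg (by simp only [id]; omega : ¬ (id y < id x))]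
    rw [hx]
    exact ih x (fun z hz => h z (by simp [hz]))

theorem foldl_extF_pos : ∀ (rest : List Int) (L mn c : Int), 1 ≤ c →
    rest.foldl extF (L, mn, c) = (rest.foldl bLcm L, mn, c + rest.length) := by
  intro rest
  induction rest with
  | nil =>
    intro L mn c _
    simp only [List.foldl_nil, List.length_nil, Nat.cast_zero, add_zero]
  | cons y ys ih =>
    intro L mn c hc
    simp only [List.foldl_cons, extF]
    rw [if_neg (by omega : ¬ c = 0)]
    rw [ih (bLcm L y) mn (c + 1) (by omega)]
    simp only [List.length_cons]
    exact congrArg (fun t => (List.foldl bLcm (bLcm L y) ys, mn, t)) (by push_cast; ring)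

theorem pointwise (m : Int) (S : List Int) (hs : S.Pairwise (· < ·))
    (hpos : ∀ y ∈ S, 1 ≤ y) :
    fA m S = leafF m (S.foldl extF (0, 0, 0)) := by
  match S with
  | [] => rfl
  | x :: rest =>
    have hx : 1 ≤ x := hpos x (by simp)
    have hrest : ∀ y ∈ rest, 1 ≤ y := fun y hy => hpos y (by simp [hy])
    have hlt : ∀ y ∈ rest, x ≤ y := by
      intro y hy
      have := (List.pairwise_cons.mp hs).1 y hy
      omega
    have h1 : (x :: rest).foldl extF (0, 0, 0) = (rest.foldl bLcm x, x, 1 + (rest.length : Int)) := by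
      simp only [List.foldl_cons, extF]
      rw [if_pos trivial]
      exact foldl_extF_pos rest x x 1 le_rfl
    have h2 : lcm_it (x :: rest) = rest.foldl pyLcm x := by
      unfold lcm_it
      rw [PySem.List.foldl_pyRange_pyGetD' (x :: rest) 0 pyLcm _ (by omega : (0:Int) ≤ 1)]
      norm_num
    rw [h1]
    simp only [fA, leafF, List.length_cons]
    rw [min?_cons_eq rest x hlt, h2, foldl_pyLcm_eq_bLcm rest x hx hrest]
    rw [if_neg (by omega : ¬ ((1 : Int) + (rest.length : Int) = 0))]
    simp only [Option.getD_some]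
    congr 2
    omega

theorem dfs_eq : ∀ (n : Nat) (exp m k L mn c : Int), (exp + 1 - k).toNat ≤ n →
    bDfs n exp m k L mn c
      = ((mySub (PySem.List.pyRange k (exp + 1))).map
          (fun S => leafF m (S.foldl extF (L, mn, c)))).sum := by
  intro n
  induction n with
  | zero =>
    intro exp m k L mn c hn
    have hk : k > exp := by omega
    rw [bDfs, if_pos hk, PySem.List.pyRange_one_eq_nil (by omega)]
    simp [mySub, leafF]
  | succ n ih =>
    intro exp m k L mn c hn
    by_cases hk : k > exp
    · rw [bDfs, if_pos hk, PySem.List.pyRange_one_eq_nil (by omega)]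
      simp [mySub, leafF]
    · rw [bDfs, if_neg hk]
      rw [PySem.List.pyRange_one_cons (by omega : k < exp + 1)]
      simp only [mySub, List.map_append, List.sum_append, List.map_map, Function.comp_def,
        List.foldl_cons]
      rw [ih exp m (k + 1) L mn c (by omega)]
      congr 1
      by_cases hc : c = 0
      · rw [if_pos hc, ih exp m (k + 1) k k 1 (by omega)]
        simp [extF, hc]
      · rw [if_neg hc, ih exp m (k + 1) (bLcm L k) mn (c + 1) (by omega)]
        simp [extF, hc]

theorem A_eq_sum (exp m : Int) :
    ie_criteria exp m = ((mySub (PySem.List.pyRange 1 (exp + 1))).map (fA m)).sum := by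
  have hlpos : ∀ y ∈ PySem.List.pyRange 1 (exp + 1), 1 ≤ y := by
    intro y hy
    rw [PySem.List.mem_pyRange_one] at hy
    omega
  have hterm : ∀ i ∈ PySem.List.pyRange 1 (exp + 1),
      ∀ comb ∈ combosA i.toNat (PySem.List.pyRange 1 (exp + 1)),
      (-1 : Int) ^ (i + 1).toNat *
        PySem.Int.floordiv m (PySem.Int.floordiv (lcm_it comb)
          ((PySem.List.min? comb id).getD 0)) = fA m comb := by
    intro i hi comb hc
    have hi1 : 1 ≤ i := (PySem.List.mem_pyRange_one.mp hi).1
    have hlen := combosA_length i.toNat _ comb hc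
    match comb with
    | [] => simp at hlen; omega
    | x :: rest =>
      simp only [fA]
      congr 2
      simp only [List.length_cons] at hlen ⊢
      omega
  have step1 : ie_criteria exp m
      = List.foldl (fun suma i =>
          suma + ((combosA i.toNat (PySem.List.pyRange 1 (exp + 1))).map (fA m)).sum)
        0 (PySem.List.pyRange 1 (exp + 1)) := by
    unfold ie_criteria
    apply PySem.List.foldl_congr_mem
    intro acc i hi
    rw [PySem.List.foldl_add]
    congr 1
    exact congrArg List.sum (List.map_congr_left (fun comb hc => hterm i hi comb hc))
  have hlen : (PySem.List.pyRange 1 (exp + 1)).length = exp.toNat := by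
    rw [PySem.List.length_pyRange_one]
    omega
  have hrange : PySem.List.pyRange 1 (exp + 1)
      = (List.range exp.toNat).map (fun k : Nat => (1 : Int) + k) := by
    rw [PySem.List.pyRange_one]
    have h : (exp + 1 - 1).toNat = exp.toNat := by omega
    rw [h]
  have hbridge : ∀ (C : Nat → Int),
      (List.map (fun i : Int => C i.toNat) (PySem.List.pyRange 1 (exp + 1))).sum
        = (List.map (fun j : Nat => C (j + 1)) (List.range exp.toNat)).sum := by
    intro C
    conv_lhs => rw [hrange]
    rw [List.map_map]
    apply congrArg List.sum
    apply List.map_congr_left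
    intro j _
    simp only [Function.comp_apply]
    have h : ((1 : Int) + (j : Int)).toNat = j + 1 := by omega
    rw [h]
  have hmain := sumC (PySem.List.pyRange 1 (exp + 1)) (fA m)
  rw [hlen, List.range_succ_eq_map] at hmain
  simp only [List.map_cons, List.sum_cons, List.map_map, Function.comp_def,
    Nat.succ_eq_add_one] at hmain
  have h0 : ((combosA 0 (PySem.List.pyRange 1 (exp + 1))).map (fA m)).sum = 0 := by
    simp [combosA, fA]
  rw [h0, zero_add] at hmain
  have hb := hbridge (fun n => ((combosA n (PySem.List.pyRange 1 (exp + 1))).map (fA m)).sum)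
  simp only [] at hb
  rw [step1, PySem.List.foldl_add, zero_add, hb, hmain]

theorem B_eq_sum (exp m : Int) :
    ie_criteria_alt exp m
      = ((mySub (PySem.List.pyRange 1 (exp + 1))).map (fA m)).sum := by
  unfold ie_criteria_alt
  rw [dfs_eq exp.toNat exp m 1 0 0 0 (by omega)]
  apply congrArg List.sum
  apply List.map_congr_left
  intro S hS
  have hsub := mySub_sublist _ S hS
  have hpair : S.Pairwise (· < ·) :=
    List.Pairwise.sublist hsub (PySem.List.pairwise_lt_pyRange_one 1 (exp + 1))
  have hpos : ∀ y ∈ S, 1 ≤ y := by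
    intro y hy
    have := hsub.subset hy
    exact (PySem.List.mem_pyRange_one.mp this).1
  exact (pointwise m S hpair hpos).symm

-- ===== VERDICT (by name: the statement is the Claim_ definition above) =====
theorem ie_criteria_spec : Claim_equal_ie_criteria := by
  intro exp m _
  unfold Spec_ie_criteria
  rw [A_eq_sum, B_eq_sum]
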